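-- pv_equiv track=rewrite | github.com/jlib245/AlgorithmStudy | 프로그래머스/1/135808. 과일 장수/과일 장수.py | solution
-- ===== SOURCE A (Python) =====
-- def solution(k, m, score):
--     score.sort()
--     total = 0
--     for i in range(len(score)//m):
--         for j in range(m):
--             s = score.pop()
--         total += s * m
--
--     return total
-- ===== SOURCE B (Python) =====
-- def solution(k, m, score):
--     # Sort ascending like A, then read each group's minimum directly by index
--     # instead of destructively popping groups off the end.
--     # (Return-value equivalence only: A additionally empties the sold part of
--     # `score`; B only sorts it in place.)
--     score.sort()
--     n = len(score)
--     return m * sum(score[n - (g + 1) * m] for g in range(n // m))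
-- ===== Notes on version B (the rewrite author's own statement) =====
-- stated objective: simpler
-- what changed: Replaces the nested destructive pop loop (pop m elements per group, keep the last popped) with a single indexed sum: after sorting, the g-th highest group's minimum sits at a fixed offset n-(g+1)*m, so the answer is m * sum of those entries; no mutation of the list beyond the sort.
-- outside the precondition, e.g. on solution(3, 0, [1, 2, 3]): A raises ZeroDivisionError, B raises ZeroDivisionError
import Mathlib
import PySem

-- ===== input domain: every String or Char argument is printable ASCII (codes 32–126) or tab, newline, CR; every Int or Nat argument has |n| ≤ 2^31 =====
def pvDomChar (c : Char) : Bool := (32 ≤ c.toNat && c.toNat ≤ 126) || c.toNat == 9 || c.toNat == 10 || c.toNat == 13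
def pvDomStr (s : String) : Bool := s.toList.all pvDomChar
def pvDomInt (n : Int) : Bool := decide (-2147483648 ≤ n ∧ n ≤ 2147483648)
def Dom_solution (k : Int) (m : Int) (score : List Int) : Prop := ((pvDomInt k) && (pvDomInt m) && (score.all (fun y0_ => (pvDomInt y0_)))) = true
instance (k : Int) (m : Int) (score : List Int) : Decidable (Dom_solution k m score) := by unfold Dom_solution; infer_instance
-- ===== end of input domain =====

-- B replaces A's destructive group-popping loop by a sort-then-indexed-sum (return value only: A also empties the sold part of `score`, B only sorts).


-- ===== PORT A =====
-- inner loop body: `s = score.pop()`  (state: (score, s))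
def aInner (st : List Int × Int) (_ : Int) : List Int × Int :=
  match PySem.List.pop? st.1 (-1) with
  | some (v, rest) => (rest, v)
  | none => st

-- outer loop body: `for j in range(m): s = score.pop()` then `total += s * m`  (state: (score, s, total))
def aOuter (m : Int) (st : List Int × Int × Int) (_ : Int) : List Int × Int × Int :=
  let st2 := (PySem.List.pyRange 0 m 1).foldl aInner (st.1, st.2.1)
  (st2.1, st2.2, st.2.2 + st2.2 * m)

def solution (k : Int) (m : Int) (score : List Int) : Int :=
  let score := PySem.List.sorted score (fun x => x) false
  ((PySem.List.pyRange 0 (PySem.Int.floordiv (score.length : Int) m) 1).foldl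
      (aOuter m) (score, 0, 0)).2.2

-- ===== PORT B =====
-- generator term of the sum: score[n - (g + 1) * m]
def bStep (score : List Int) (m : Int) (acc : Int) (g : Int) : Int :=
  acc + PySem.List.pyGetD score ((score.length : Int) - (g + 1) * m) 0

def solution_alt (k : Int) (m : Int) (score : List Int) : Int :=
  let score := PySem.List.sorted score (fun x => x) false
  m * ((PySem.List.pyRange 0 (PySem.Int.floordiv (score.length : Int) m) 1).foldl
        (bStep score m) 0)

-- ===== PRECONDITION & SPEC =====
-- A (and B) raise ZeroDivisionError on m = 0 (len(score)//m); excluded.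
def Pre_solution (k : Int) (m : Int) (score : List Int) : Prop := m ≠ 0
instance (k : Int) (m : Int) (score : List Int) : Decidable (Pre_solution k m score) := by unfold Pre_solution; infer_instance
def pvWitness_solution : Int × Int × List Int := (4, 2, [1, 2, 3, 1, 2])

def Spec_solution (k : Int) (m : Int) (score : List Int) (out : Int) : Prop := out = solution_alt k m score
instance (k : Int) (m : Int) (score : List Int) (out : Int) : Decidable (Spec_solution k m score out) := by unfold Spec_solution; infer_instance

-- ===== CLAIM (what is proved, stated in full; the proofs are below) =====
def Claim_equal_solution : Prop := ∀ (k : Int) (m : Int) (score : List Int), Dom_solution k m score → Pre_solution k m score → Spec_solution k m score (solution k m score)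

-- ===== LEMMAS AND PROOFS =====

theorem inner_char (j : Nat) : ∀ (lst : List Int) (s : Int), j ≤ lst.length →
    (PySem.List.pyRange 0 (j : Int) 1).foldl aInner (lst, s) =
      (lst.take (lst.length - j), if j = 0 then s else lst.getD (lst.length - j) 0) := by
  induction j with
  | zero =>
    intro lst s _
    simp [PySem.List.pyRange_one_eq_nil (le_refl (0:Int))]
  | succ j ih =>
    intro lst s h
    have hrange : PySem.List.pyRange 0 ((j + 1 : Nat) : Int) 1 =
        PySem.List.pyRange 0 (j : Int) 1 ++ [(j : Int)] := by
      have := PySem.List.pyRange_one_succ_right (a := 0) (b := (j : Int)) (by positivity)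
      push_cast
      exact this
    rw [hrange, List.foldl_append, ih lst s (by omega)]
    have hidx : lst.length - j = (lst.length - (j + 1)) + 1 := by omega
    have hlt : lst.length - (j + 1) < lst.length := by omega
    have htake : lst.take (lst.length - j) =
        lst.take (lst.length - (j + 1)) ++ [lst[lst.length - (j + 1)]] := by
      rw [hidx, List.take_add_one]
      simp [List.getElem?_eq_getElem hlt]
    simp only [List.foldl_cons, List.foldl_nil, aInner, htake, PySem.List.pop?_last]
    simp [List.getElem?_eq_getElem hlt]

theorem outer_char (L : List Int) (m' : Nat) (hm : 0 < m') (i : Nat) :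
    ∀ (s t : Int), i * m' ≤ L.length →
    (PySem.List.pyRange 0 (i : Int) 1).foldl (aOuter (m' : Int)) (L, s, t) =
      (L.take (L.length - i * m'),
       (if i = 0 then s else L.getD (L.length - i * m') 0),
       t + ((List.range i).map (fun g => L.getD (L.length - (g + 1) * m') 0)).sum * (m' : Int)) := by
  induction i with
  | zero =>
    intro s t _
    simp [PySem.List.pyRange_one_eq_nil (le_refl (0:Int))]
  | succ i ih =>
    intro s t h
    have hrange : PySem.List.pyRange 0 ((i + 1 : Nat) : Int) 1 =
        PySem.List.pyRange 0 (i : Int) 1 ++ [(i : Int)] := by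
      have := PySem.List.pyRange_one_succ_right (a := 0) (b := (i : Int)) (by positivity)
      push_cast
      exact this
    have hh : i * m' + m' ≤ L.length := by rw [Nat.succ_mul] at h; exact h
    rw [hrange, List.foldl_append, ih s t (by omega)]
    simp only [List.foldl_cons, List.foldl_nil, aOuter]
    have hlen : (L.take (L.length - i * m')).length = L.length - i * m' := by
      rw [List.length_take]; omega
    have hmle : m' ≤ (L.take (L.length - i * m')).length := by rw [hlen]; omega
    rw [inner_char m' _ _ hmle]
    have hne : ¬ m' = 0 := by omega
    simp only [if_neg hne, hlen]
    have e1 : L.length - i * m' - m' = L.length - (i + 1) * m' := by rw [Nat.succ_mul]; omega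
    have e2 : (L.take (L.length - i * m')).take (L.length - (i+1) * m') =
        L.take (L.length - (i + 1) * m') := by
      rw [List.take_take]; congr 1; omega
    have hlt : L.length - (i + 1) * m' < L.length := by rw [Nat.succ_mul]; omega
    have e3 : (L.take (L.length - i * m')).getD (L.length - (i+1) * m') 0 =
        L.getD (L.length - (i + 1) * m') 0 := by
      have hlt2 : L.length - (i+1) * m' < (L.take (L.length - i * m')).length := by
        rw [hlen]; omega
      rw [List.getD_eq_getElem _ 0 hlt2, List.getD_eq_getElem _ 0 hlt, List.getElem_take]
    rw [e1, e2, e3]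
    simp only [List.range_succ, List.map_append, List.sum_append, List.map_cons,
      List.map_nil, List.sum_cons, List.sum_nil, Nat.succ_ne_zero, if_false,
      Prod.mk.injEq]
    exact ⟨trivial, trivial, by ring⟩

theorem b_char (L : List Int) (m' : Nat) (hm : 0 < m') (i : Nat) :
    ∀ (t : Int), i * m' ≤ L.length →
    (PySem.List.pyRange 0 (i : Int) 1).foldl (bStep L (m' : Int)) t =
      t + ((List.range i).map (fun g => L.getD (L.length - (g + 1) * m') 0)).sum := by
  induction i with
  | zero =>
    intro t _
    simp [PySem.List.pyRange_one_eq_nil (le_refl (0:Int))]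
  | succ i ih =>
    intro t h
    have hrange : PySem.List.pyRange 0 ((i + 1 : Nat) : Int) 1 =
        PySem.List.pyRange 0 (i : Int) 1 ++ [(i : Int)] := by
      have := PySem.List.pyRange_one_succ_right (a := 0) (b := (i : Int)) (by positivity)
      push_cast
      exact this
    have hh : i * m' + m' ≤ L.length := by rw [Nat.succ_mul] at h; exact h
    rw [hrange, List.foldl_append, ih t (by omega)]
    simp only [List.foldl_cons, List.foldl_nil, bStep]
    have hcast : ((L.length : Int) - ((i : Int) + 1) * (m' : Int)) =
        ((L.length - (i + 1) * m' : Nat) : Int) := by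
      push_cast [Nat.cast_sub h]
      ring
    rw [hcast, PySem.List.pyGetD_natCast]
    simp only [List.range_succ, List.map_append, List.sum_append, List.map_cons,
      List.map_nil, List.sum_cons, List.sum_nil]
    ring

-- ===== VERDICT (by name: the statement is the Claim_ definition above) =====
theorem solution_spec : Claim_equal_solution := by
  unfold Claim_equal_solution
  intro k m score _ hpre
  unfold Pre_solution at hpre
  simp only [Spec_solution, solution, solution_alt]
  generalize PySem.List.sorted score (fun x => x) false = L
  rcases lt_or_gt_of_ne hpre with hneg | hpos
  · have hq : PySem.Int.floordiv (L.length : Int) m ≤ 0 := by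
      by_contra hc
      push_neg at hc
      have h1 := PySem.Int.mod_neg_neg (L.length : Int) m
      have h2 : PySem.Int.mod (-(L.length : Int)) (-m) = (-(L.length : Int)) % (-m) :=
        PySem.Int.mod_eq_emod_of_pos (by omega)
      have h3 : 0 ≤ (-(L.length : Int)) % (-m) := Int.emod_nonneg _ (by omega)
      have h4 := PySem.Int.floordiv_mul_add_mod (L.length : Int) m
      have h5 : (0 : Int) ≤ (L.length : Int) := Int.natCast_nonneg _
      nlinarith
    rw [PySem.List.pyRange_one_eq_nil hq]
    simp
  · obtain ⟨m', rfl⟩ : ∃ m' : Nat, m = (m' : Int) :=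
      ⟨m.toNat, (Int.toNat_of_nonneg hpos.le).symm⟩
    have hm' : 0 < m' := by exact_mod_cast hpos
    rw [PySem.Int.floordiv_natCast]
    have hle : (L.length / m') * m' ≤ L.length := Nat.div_mul_le_self _ _
    rw [outer_char L m' hm' _ 0 0 hle, b_char L m' hm' _ 0 hle]
    ring
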